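-- pv_equiv track=rewrite | github.com/super30admin/Misc-1 | brokenCalc.py | BruteForcebrokenCalc
-- ===== SOURCE A (Python) =====
-- def BruteForcebrokenCalc(startValue: int, target: int) -> int:
--     '''
--     T = O(2**N)
--     '''
--     if startValue == target:return 0
--     q = []
--     q.append(startValue)
--     ops = 1
--     while q:
--         size = len(q)
--         for i in range(size):
--             curr = q.pop(0)
--             if curr-1 == target or 2* curr == target: return ops
--             if curr > target:
--                 q.append(curr-1)
--             else:
--                 q.append(curr-1)
--                 q.append(2*curr)
--         ops += 1
--     return 4738642
-- ===== SOURCE B (Python) =====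
-- def BruteForcebrokenCalc(startValue: int, target: int) -> int:
--     ops = 0
--     t = target
--     while t > startValue:
--         if t % 2 == 0:
--             t //= 2
--         else:
--             t += 1
--         ops += 1
--     return ops + (startValue - t)
-- ===== Notes on version B (the rewrite author's own statement) =====
-- stated objective: faster
-- what changed: replaces the exponential forward BFS over an explicit queue with a backward greedy loop on the target (halve when even, else increment) plus the residual difference, on the problem's natural domain startValue, target >= 1
-- outside the precondition, e.g. on BruteForcebrokenCalc(-1, -6): A returns 3, B returns 5; on BruteForcebrokenCalc(1, -6): A returns 5, B returns 7
import Mathlib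
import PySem

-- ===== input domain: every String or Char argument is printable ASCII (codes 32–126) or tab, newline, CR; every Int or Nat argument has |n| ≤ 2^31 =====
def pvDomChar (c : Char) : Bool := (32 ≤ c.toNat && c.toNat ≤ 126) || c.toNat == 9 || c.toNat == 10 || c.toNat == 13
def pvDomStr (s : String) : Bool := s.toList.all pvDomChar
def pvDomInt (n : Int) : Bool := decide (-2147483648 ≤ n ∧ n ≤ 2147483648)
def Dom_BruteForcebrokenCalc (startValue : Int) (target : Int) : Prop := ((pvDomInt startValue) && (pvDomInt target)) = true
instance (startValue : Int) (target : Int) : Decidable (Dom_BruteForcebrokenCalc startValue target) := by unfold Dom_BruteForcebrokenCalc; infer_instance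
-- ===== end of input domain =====

-- B replaces A's exponential forward BFS by the backward greedy (halve the target if even, else
-- increment; then add the residual difference), exact on the problem's natural domain
-- startValue ≥ 1 ∧ target ≥ 1 (outside it A diverges or relies on doubling negative values).


-- ===== PORT A =====
-- children appended to the queue for a popped element (the two `q.append` branches)
def pvChildren (target curr : Int) : List Int :=
  if curr > target then [curr - 1] else [curr - 1, 2 * curr]

-- the `for i in range(size)` loop: pop the head `size` times; `none` signals `return ops`
def pvInner (target : Int) : Nat → List Int → Option (List Int)
  | 0, q => some q
  | n + 1, q =>
    match q with
    | [] => some []   -- Python's pop(0) would raise here; unreachable: n+1 ≤ length q at every call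
    | curr :: rest =>
      if curr - 1 = target ∨ 2 * curr = target then none
      else pvInner target n (rest ++ pvChildren target curr)

-- the `while q:` loop; the fuel argument is a totality guard only (Python's loop can diverge
-- outside Pre_; inside Pre_ the BFS is proved to return within the fuel passed below)
def pvWhile (target : Int) : Nat → List Int → Int → Int
  | 0, _, _ => 4738642
  | fuel + 1, q, ops =>
    if q = [] then 4738642
    else
      match pvInner target q.length q with
      | none => ops
      | some q' => pvWhile target fuel q' (ops + 1)

def BruteForcebrokenCalc (startValue : Int) (target : Int) : Int :=
  if startValue = target then 0
  else pvWhile target (startValue.natAbs + 2 * target.natAbs + 4) [startValue] 1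

-- ===== PORT B =====
-- the `while t > startValue:` loop of Source B; fuel is a totality guard only (the loop can diverge
-- outside Pre_; inside Pre_ it is proved to finish within the fuel passed below)
def pvGLoop (s : Int) : Nat → Int → Int → Int
  | 0, t, ops => ops + (s - t)
  | fuel + 1, t, ops =>
    if s < t then
      pvGLoop s fuel (if PySem.Int.mod t 2 = 0 then PySem.Int.floordiv t 2 else t + 1) (ops + 1)
    else ops + (s - t)

def BruteForcebrokenCalc_alt (startValue : Int) (target : Int) : Int :=
  pvGLoop startValue (2 * target.natAbs + 4) target 0

-- ===== PRECONDITION & SPEC =====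
-- Pre_ restricts to the problem's natural domain (LeetCode 991: startValue, target ≥ 1).
-- Outside it A's BFS diverges whenever startValue ≤ 0 < target, and for target ≤ 0 it reaches the
-- target by doubling negative values, which the halving greedy deliberately does not replicate.
def Pre_BruteForcebrokenCalc (startValue : Int) (target : Int) : Prop :=
  1 ≤ startValue ∧ 1 ≤ target
instance (startValue : Int) (target : Int) : Decidable (Pre_BruteForcebrokenCalc startValue target) := by
  unfold Pre_BruteForcebrokenCalc; infer_instance

def pvWitness_BruteForcebrokenCalc : Int × Int := (2, 3)

def Spec_BruteForcebrokenCalc (startValue : Int) (target : Int) (out : Int) : Prop :=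
  out = BruteForcebrokenCalc_alt startValue target
instance (startValue : Int) (target : Int) (out : Int) : Decidable (Spec_BruteForcebrokenCalc startValue target out) := by
  unfold Spec_BruteForcebrokenCalc; infer_instance

-- ===== CLAIM (what is proved, stated in full; the proofs are below) =====
def Claim_equal_BruteForcebrokenCalc : Prop := ∀ (startValue : Int) (target : Int), Dom_BruteForcebrokenCalc startValue target → Pre_BruteForcebrokenCalc startValue target → Spec_BruteForcebrokenCalc startValue target (BruteForcebrokenCalc startValue target)

-- ===== LEMMAS AND PROOFS =====

-- unpruned reachability: Reach t n x ↔ n moves (x ↦ x-1 or x ↦ 2x) lead from x to t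
def Reach (t : Int) : Nat → Int → Prop
  | 0, x => x = t
  | n + 1, x => Reach t n (x - 1) ∨ Reach t n (2 * x)

-- pruned paths, exactly as the BFS branches: PRm t n y x ↔ n pruned moves lead from y to x
def PRm (t : Int) : Nat → Int → Int → Prop
  | 0, y, x => y = x
  | n + 1, y, x => ∃ z ∈ pvChildren t y, PRm t n z x

-- the multiset of queue entries after j whole while-iterations
def pvLevels (t : Int) : Nat → List Int → List Int
  | 0, L => L
  | n + 1, L => pvLevels t n (L.flatMap (pvChildren t))

def HitN (s t : Int) (j : Nat) : Prop := ∃ x, PRm t j s x ∧ (x - 1 = t ∨ 2 * x = t)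

-- canonical greedy value, with a fixed sufficient fuel
def GV (s t : Int) : Int := pvGLoop s (2 * t.toNat + 1) t 0

-- Python // and % with the positive literal divisor 2
theorem pvMod2 (t : Int) : PySem.Int.mod t 2 = t % 2 :=
  PySem.Int.mod_eq_emod_of_pos (by norm_num)
theorem pvFdiv2 (t : Int) : PySem.Int.floordiv t 2 = t / 2 :=
  PySem.Int.floordiv_eq_ediv_of_pos (by norm_num)

theorem pvGLoop_acc (s : Int) : ∀ (fuel : Nat) (t ops : Int),
    pvGLoop s fuel t ops = ops + pvGLoop s fuel t 0 := by
  intro fuel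
  induction fuel with
  | zero => intro t ops; simp [pvGLoop]
  | succ f ih =>
    intro t ops
    simp only [pvGLoop]
    split
    · rw [ih _ (ops + 1), ih _ (0 + 1)]; ring
    · ring

theorem pvGLoop_stab (s : Int) : ∀ (k : Nat) (t : Int), t.toNat ≤ k → 1 ≤ s → 1 ≤ t →
    ∀ f1 f2 : Nat, 2 * t.toNat < f1 → 2 * t.toNat < f2 → pvGLoop s f1 t 0 = pvGLoop s f2 t 0 := by
  intro k
  induction k with
  | zero => intro t hk hs ht _ _ _ _; omega
  | succ k ih =>
    intro t hk hs ht f1 f2 h1 h2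
    by_cases hts : s < t
    · obtain ⟨g1, rfl⟩ : ∃ g, f1 = g + 1 := ⟨f1 - 1, by omega⟩
      obtain ⟨g2, rfl⟩ : ∃ g, f2 = g + 1 := ⟨f2 - 1, by omega⟩
      simp only [pvGLoop, if_pos hts]
      rw [pvGLoop_acc s g1, pvGLoop_acc s g2]
      by_cases hev : PySem.Int.mod t 2 = 0
      · rw [if_pos hev]
        rw [pvMod2] at hev
        rw [pvFdiv2]
        have ht2 : 1 ≤ t / 2 := by omega
        have : (t / 2).toNat ≤ k := by omega
        rw [ih (t / 2) this hs ht2 g1 g2 (by omega) (by omega)]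
      · rw [if_neg hev]
        rw [pvMod2] at hev
        have hodd : t % 2 = 1 := by omega
        -- t odd and s < t with 1 ≤ s forces t ≥ 3; unfold a second step on both sides
        have ht3 : 3 ≤ t := by omega
        obtain ⟨e1, rfl⟩ : ∃ e, g1 = e + 1 := ⟨g1 - 1, by omega⟩
        obtain ⟨e2, rfl⟩ : ∃ e, g2 = e + 1 := ⟨g2 - 1, by omega⟩
        have hts1 : s < t + 1 := by omega
        have hev1 : PySem.Int.mod (t + 1) 2 = 0 := by
          rw [pvMod2]; omega
        simp only [pvGLoop, if_pos hts1, if_pos hev1]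
        rw [pvGLoop_acc s e1, pvGLoop_acc s e2]
        rw [pvFdiv2]
        have hh : 1 ≤ (t + 1) / 2 := by omega
        have hlt : ((t + 1) / 2).toNat ≤ k := by omega
        rw [ih ((t + 1) / 2) hlt hs hh e1 e2 (by omega) (by omega)]
    · obtain ⟨g1, rfl⟩ : ∃ g, f1 = g + 1 := ⟨f1 - 1, by omega⟩
      obtain ⟨g2, rfl⟩ : ∃ g, f2 = g + 1 := ⟨f2 - 1, by omega⟩
      simp only [pvGLoop, if_neg hts]

theorem GV_eq_of_fuel (s t : Int) (hs : 1 ≤ s) (ht : 1 ≤ t) (f : Nat) (hf : 2 * t.toNat < f) :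
    pvGLoop s f t 0 = GV s t :=
  pvGLoop_stab s t.toNat t le_rfl hs ht f (2 * t.toNat + 1) hf (by omega)

theorem GV_le (s t : Int) (h : t ≤ s) : GV s t = s - t := by
  simp [GV, pvGLoop, not_lt.mpr h]

theorem GV_even (s t : Int) (hs : 1 ≤ s) (h : s < t) (he : t % 2 = 0) :
    GV s t = 1 + GV s (t / 2) := by
  have hev : PySem.Int.mod t 2 = 0 := by rw [pvMod2]; omega
  show pvGLoop s (2 * t.toNat + 1) t 0 = _
  simp only [pvGLoop, if_pos h, if_pos hev]
  rw [pvGLoop_acc, pvFdiv2]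
  rw [GV_eq_of_fuel s (t / 2) hs (by omega) _ (by omega)]
  ring

theorem GV_odd (s t : Int) (hs : 1 ≤ s) (h : s < t) (ho : t % 2 = 1) :
    GV s t = 2 + GV s ((t + 1) / 2) := by
  have hodd : ¬ PySem.Int.mod t 2 = 0 := by
    rw [pvMod2]; omega
  have ht3 : 3 ≤ t := by omega
  have hev1 : PySem.Int.mod (t + 1) 2 = 0 := by
    rw [pvMod2]; omega
  show pvGLoop s (2 * t.toNat + 1) t 0 = _
  simp only [pvGLoop, if_pos h, if_neg hodd]
  rw [pvGLoop_acc]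
  obtain ⟨e, he⟩ : ∃ e, 2 * t.toNat = e + 1 := ⟨2 * t.toNat - 1, by omega⟩
  rw [he]
  simp only [pvGLoop, if_pos (show s < t + 1 by omega), if_pos hev1]
  rw [pvGLoop_acc, pvFdiv2]
  rw [GV_eq_of_fuel s ((t + 1) / 2) hs (by omega) _ (by omega)]
  ring

theorem GV_nonneg (s : Int) : ∀ (k : Nat) (t : Int), t.toNat ≤ k → 1 ≤ s → 1 ≤ t →
    0 ≤ GV s t := by
  intro k
  induction k with
  | zero => intro t hk _ ht; omega
  | succ k ih =>
    intro t hk hs ht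
    by_cases hts : s < t
    · rcases Int.emod_two_eq_zero_or_one t with he | ho
      · rw [GV_even s t hs hts he]
        have := ih (t / 2) (by omega) hs (by omega)
        omega
      · rw [GV_odd s t hs hts ho]
        have := ih ((t + 1) / 2) (by omega) hs (by omega)
        omega
    · rw [GV_le s t (by omega)]; omega

theorem GV_pos (s t : Int) (hs : 1 ≤ s) (ht : 1 ≤ t) (hne : s ≠ t) : 1 ≤ GV s t := by
  by_cases hts : s < t
  · rcases Int.emod_two_eq_zero_or_one t with he | ho
    · rw [GV_even s t hs hts he]
      have := GV_nonneg s (t / 2).toNat (t / 2) le_rfl hs (by omega)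
      omega
    · rw [GV_odd s t hs hts ho]
      have := GV_nonneg s ((t + 1) / 2).toNat ((t + 1) / 2) le_rfl hs (by omega)
      omega
  · rw [GV_le s t (by omega)]; omega

theorem GV_bound (s : Int) : ∀ (k : Nat) (t : Int), t.toNat ≤ k → 1 ≤ s → 1 ≤ t →
    GV s t ≤ s.natAbs + 2 * t.toNat + 2 := by
  intro k
  induction k with
  | zero => intro t hk _ ht; omega
  | succ k ih =>
    intro t hk hs ht
    by_cases hts : s < t
    · rcases Int.emod_two_eq_zero_or_one t with he | ho
      · rw [GV_even s t hs hts he]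
        have := ih (t / 2) (by omega) hs (by omega)
        omega
      · rw [GV_odd s t hs hts ho]
        have := ih ((t + 1) / 2) (by omega) hs (by omega)
        omega
    · rw [GV_le s t (by omega)]; omega

theorem alt_eq_GV (s t : Int) (hs : 1 ≤ s) (ht : 1 ≤ t) :
    BruteForcebrokenCalc_alt s t = GV s t := by
  show pvGLoop s (2 * t.natAbs + 4) t 0 = GV s t
  have : t.natAbs = t.toNat := by omega
  rw [this]
  exact GV_eq_of_fuel s t hs ht _ (by omega)

-- a path may be extended by one move at its target end
theorem Reach_extend (t mid : Int) : ∀ (n : Nat) (x : Int), Reach mid n x →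
    (t = mid - 1 ∨ t = 2 * mid) → Reach t (n + 1) x := by
  intro n
  induction n with
  | zero =>
    intro x hx hstep
    simp only [Reach] at hx
    subst hx
    rcases hstep with h | h
    · exact Or.inl (by simp [Reach, h])
    · exact Or.inr (by simp [Reach, h])
  | succ n ih =>
    intro x hx hstep
    rcases hx with h | h
    · exact Or.inl (ih _ h hstep)
    · exact Or.inr (ih _ h hstep)

-- and conversely the last move of a nonempty path can be split off
theorem Reach_last (t : Int) : ∀ (n : Nat) (x : Int), Reach t (n + 1) x →
    ∃ mid, Reach mid n x ∧ (t = mid - 1 ∨ t = 2 * mid) := by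
  intro n
  induction n with
  | zero =>
    intro x hx
    rcases hx with h | h
    · exact ⟨x, rfl, Or.inl (by simpa [Reach] using h.symm ▸ rfl)⟩
    · exact ⟨x, rfl, Or.inr (by simpa [Reach] using h.symm ▸ rfl)⟩
  | succ n ih =>
    intro x hx
    rcases hx with h | h
    · obtain ⟨mid, hm, hstep⟩ := ih _ h
      exact ⟨mid, Or.inl hm, hstep⟩
    · obtain ⟨mid, hm, hstep⟩ := ih _ h
      exact ⟨mid, Or.inr hm, hstep⟩

-- from a nonnegative value each move lowers the value by at most one
theorem Reach_lb (t : Int) (ht : 0 < t) : ∀ (n : Nat) (x : Int), 0 ≤ x → Reach t n x →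
    x - t ≤ n := by
  intro n
  induction n with
  | zero => intro x _ hx; simp only [Reach] at hx; omega
  | succ n ih =>
    intro x hx hr
    rcases hr with h | h
    · by_cases h1 : 0 ≤ x - 1
      · have := ih _ h1 h
        omega
      · omega
    · have := ih _ (by omega) h
      omega

theorem Reach_dec (t : Int) : ∀ (k : Nat) (x : Int), x - k = t → Reach t k x := by
  intro k
  induction k with
  | zero => intro x hx; simp only [Reach]; omega
  | succ k ih =>
    intro x hx
    exact Or.inl (ih (x - 1) (by push_cast at hx ⊢; omega))

-- the greedy value is achieved by a path
theorem GV_ach (s : Int) : ∀ (k : Nat) (t : Int), t.toNat ≤ k → 1 ≤ s → 1 ≤ t →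
    Reach t (GV s t).toNat s := by
  intro k
  induction k with
  | zero => intro t hk _ ht; omega
  | succ k ih =>
    intro t hk hs ht
    by_cases hts : s < t
    · rcases Int.emod_two_eq_zero_or_one t with he | ho
      · rw [GV_even s t hs hts he]
        have hr := ih (t / 2) (by omega) hs (by omega)
        have hnn := GV_nonneg s (t / 2).toNat (t / 2) le_rfl hs (by omega)
        have : (1 + GV s (t / 2)).toNat = (GV s (t / 2)).toNat + 1 := by omega
        rw [this]
        exact Reach_extend t (t / 2) _ s hr (Or.inr (by omega))
      · rw [GV_odd s t hs hts ho]
        have hr := ih ((t + 1) / 2) (by omega) hs (by omega)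
        have hnn := GV_nonneg s ((t + 1) / 2).toNat ((t + 1) / 2) le_rfl hs (by omega)
        have h1 : Reach (t + 1) ((GV s ((t + 1) / 2)).toNat + 1) s :=
          Reach_extend (t + 1) ((t + 1) / 2) _ s hr (Or.inr (by omega))
        have : (2 + GV s ((t + 1) / 2)).toNat = ((GV s ((t + 1) / 2)).toNat + 1) + 1 := by omega
        rw [this]
        exact Reach_extend t (t + 1) _ s h1 (Or.inl (by omega))
    · rw [GV_le s t (by omega)]
      exact Reach_dec t _ s (by omega)

-- the greedy value changes by at most 2 when the target grows by 1
theorem GV_nbr (s : Int) : ∀ (k : Nat) (t : Int), t.toNat ≤ k → 1 ≤ s → 1 ≤ t →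
    GV s t ≤ GV s (t + 1) + 2 := by
  intro k
  induction k with
  | zero => intro t hk _ ht; omega
  | succ k ih =>
    intro t hk hs ht
    by_cases hts : s < t
    · rcases Int.emod_two_eq_zero_or_one t with he | ho
      · -- t even > s, t+1 odd > s
        rw [GV_even s t hs hts he, GV_odd s (t + 1) hs (by omega) (by omega)]
        have h1 : (t + 1 + 1) / 2 = t / 2 + 1 := by omega
        rw [h1]
        have := ih (t / 2) (by omega) hs (by omega)
        omega
      · -- t odd > s, t+1 even
        rw [GV_odd s t hs hts ho, GV_even s (t + 1) hs (by omega) (by omega)]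
        omega
    · by_cases hts1 : s < t + 1
      · -- t = s
        have hts' : t = s := by omega
        rw [GV_le s t (by omega)]
        have := GV_nonneg s (t + 1).toNat (t + 1) le_rfl hs (by omega)
        omega
      · rw [GV_le s t (by omega), GV_le s (t + 1) (by omega)]
        omega

-- lower bound: every path is at least as long as the greedy value
theorem GV_lb (s : Int) (hs : 1 ≤ s) : ∀ (n : Nat), (∀ m, m < n → ∀ t : Int, 1 ≤ t →
    Reach t m s → GV s t ≤ m) → ∀ t : Int, 1 ≤ t → Reach t n s → GV s t ≤ n := by
  intro n ih t ht hr
  match n with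
  | 0 =>
    simp only [Reach] at hr
    rw [GV_le s t (by omega)]
    omega
  | Nat.succ n =>
    by_cases hts : s < t
    · obtain ⟨mid, hm, hstep⟩ := Reach_last t n s hr
      rcases Int.emod_two_eq_zero_or_one t with he | ho
      · rcases hstep with h | h
        · -- last move was a decrement: mid = t + 1, odd
          have hmid : mid = t + 1 := by omega
          subst hmid
          -- t+1 is odd and > s, so the path to it is nonempty and ends at t+2
          match n, hm with
          | 0, hm => simp only [Reach] at hm; omega
          | Nat.succ n, hm =>
            obtain ⟨mid2, hm2, hstep2⟩ := Reach_last (t + 1) n s hm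
            have hmid2 : mid2 = t + 2 := by
              rcases hstep2 with h2 | h2 <;> omega
            subst hmid2
            have h2 := ih n (by omega) (t + 2) (by omega) hm2
            rw [GV_even s (t + 2) hs (by omega) (by omega)] at h2
            have h3 : (t + 2) / 2 = t / 2 + 1 := by omega
            rw [h3] at h2
            have h4 := GV_nbr s (t / 2).toNat (t / 2) le_rfl hs (by omega)
            rw [GV_even s t hs hts he]
            omega
        · -- last move was a doubling: mid = t / 2
          have hmid : mid = t / 2 := by omega
          subst hmid
          have h2 := ih n (by omega) (t / 2) (by omega) hm
          rw [GV_even s t hs hts he]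
          omega
      · -- t odd: the last move must be a decrement
        have hmid : mid = t + 1 := by
          rcases hstep with h | h <;> omega
        subst hmid
        have h2 := ih n (by omega) (t + 1) (by omega) hm
        rw [GV_odd s t hs hts ho]
        rw [GV_even s (t + 1) hs (by omega) (by omega)] at h2
        omega
    · rw [GV_le s t (by omega)]
      have := Reach_lb t (by omega) (n + 1) s (by omega) hr
      omega

theorem GV_lb' (s : Int) (hs : 1 ≤ s) : ∀ (n : Nat) (t : Int), 1 ≤ t →
    Reach t n s → GV s t ≤ n := by
  intro n
  induction n using Nat.strong_induction_on with
  | _ n ih =>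
    intro t ht hr
    exact GV_lb s hs n (fun m hm t' ht' hr' => ih m hm t' ht' hr') t ht hr

theorem mem_pvChildren_dec (t x : Int) : x - 1 ∈ pvChildren t x := by
  unfold pvChildren; split <;> simp

theorem PRm_dec (t : Int) : ∀ (k : Nat) (x : Int), PRm t k x (x - k) := by
  intro k
  induction k with
  | zero => intro x; simp [PRm]
  | succ k ih =>
    intro x
    refine ⟨x - 1, mem_pvChildren_dec t x, ?_⟩
    have := ih (x - 1)
    have heq : x - 1 - (k : Int) = x - ((k : Nat) + 1 : Nat) := by push_cast; ring
    rwa [heq] at this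

theorem PRm_to_Reach (t : Int) : ∀ (j : Nat) (y x : Int), PRm t j y x → Reach x j y := by
  intro j
  induction j with
  | zero => intro y x h; simpa [PRm, Reach] using h
  | succ j ih =>
    intro y x h
    obtain ⟨z, hz, hp⟩ := h
    unfold pvChildren at hz
    split at hz
    · have hz' : z = y - 1 := by simpa using hz
      subst hz'; exact Or.inl (ih _ _ hp)
    · have hz' : z = y - 1 ∨ z = 2 * y := by simpa using hz
      rcases hz' with hz' | hz'
      · subst hz'; exact Or.inl (ih _ _ hp)
      · subst hz'; exact Or.inr (ih _ _ hp)

-- every unpruned path can be replaced by a pruned path with a final hit, no longer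
theorem prune (t : Int) (ht : 1 ≤ t) : ∀ (n : Nat), (∀ m, m < n → ∀ x : Int, x ≠ t →
      Reach t m x → ∃ j, j + 1 ≤ m ∧ HitN x t j) →
    ∀ x : Int, x ≠ t → Reach t n x → ∃ j, j + 1 ≤ n ∧ HitN x t j := by
  intro n ih x hx hr
  match n with
  | 0 => simp only [Reach] at hr; exact absurd hr hx
  | Nat.succ n =>
    by_cases hhit : x - 1 = t ∨ 2 * x = t
    · exact ⟨0, by omega, x, by simp [PRm], hhit⟩
    · rw [not_or] at hhit
      rcases hr with h | h
      · -- follow the decrement, always pruned-legal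
        have hne : x - 1 ≠ t := hhit.1
        obtain ⟨j, hj, y, hp, hy⟩ := ih n (by omega) (x - 1) hne h
        refine ⟨j + 1, by omega, y, ⟨x - 1, mem_pvChildren_dec t x, hp⟩, hy⟩
      · by_cases hxt : t < x
        · -- doubling above the target: replace the whole path by decrements to t+1
          have hlb := Reach_lb t (by omega) n (2 * x) (by omega) h
          refine ⟨(x - t - 1).toNat, by omega, t + 1, ?_, Or.inl (by ring)⟩
          have := PRm_dec t (x - t - 1).toNat x
          have heq : x - ((x - t - 1).toNat : Int) = t + 1 := by omega
          rwa [heq] at this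
        · have hne : 2 * x ≠ t := hhit.2
          obtain ⟨j, hj, y, hp, hy⟩ := ih n (by omega) (2 * x) hne h
          have hz : 2 * x ∈ pvChildren t x := by
            unfold pvChildren
            rw [if_neg (by omega)]
            simp
          refine ⟨j + 1, by omega, y, ⟨2 * x, hz, hp⟩, hy⟩

theorem prune' (t : Int) (ht : 1 ≤ t) : ∀ (n : Nat) (x : Int), x ≠ t → Reach t n x →
    ∃ j, j + 1 ≤ n ∧ HitN x t j := by
  intro n
  induction n using Nat.strong_induction_on with
  | _ n ih =>
    intro x hx hr
    exact prune t ht n (fun m hm x' hx' hr' => ih m hm x' hx' hr') x hx hr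

theorem pvChildren_ne_nil (t x : Int) : pvChildren t x ≠ [] := by
  unfold pvChildren; split <;> simp

theorem flatMap_children_ne_nil (t : Int) (L : List Int) (h : L ≠ []) :
    L.flatMap (pvChildren t) ≠ [] := by
  match L with
  | [] => exact absurd rfl h
  | x :: L' =>
    simp only [List.flatMap_cons, ne_eq, List.append_eq_nil_iff, not_and]
    intro hc
    exact absurd hc (pvChildren_ne_nil t x)

theorem mem_pvLevels (t : Int) : ∀ (j : Nat) (L : List Int) (x : Int),
    x ∈ pvLevels t j L ↔ ∃ y ∈ L, PRm t j y x := by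
  intro j
  induction j with
  | zero =>
    intro L x
    simp [pvLevels, PRm]
  | succ j ih =>
    intro L x
    simp only [pvLevels]
    rw [ih]
    constructor
    · rintro ⟨y, hy, hp⟩
      rw [List.mem_flatMap] at hy
      obtain ⟨z, hz, hyz⟩ := hy
      exact ⟨z, hz, y, hyz, hp⟩
    · rintro ⟨z, hz, y, hyz, hp⟩
      exact ⟨y, List.mem_flatMap.mpr ⟨z, hz, hyz⟩, hp⟩

-- the inner for-loop: no hit among the first n queue entries → they are replaced by their children
theorem pvInner_no_hit (t : Int) : ∀ (n : Nat) (q : List Int), n ≤ q.length →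
    (∀ x ∈ q.take n, ¬ (x - 1 = t ∨ 2 * x = t)) →
    pvInner t n q = some (q.drop n ++ (q.take n).flatMap (pvChildren t)) := by
  intro n
  induction n with
  | zero => intro q _ _; simp [pvInner]
  | succ n ih =>
    intro q hlen hno
    match q with
    | [] => simp at hlen
    | curr :: rest =>
      have hnocurr : ¬ (curr - 1 = t ∨ 2 * curr = t) := hno curr (by simp)
      simp only [pvInner, if_neg hnocurr]
      have hlen' : n ≤ (rest ++ pvChildren t curr).length := by
        simp only [List.length_append]
        simp only [List.length_cons] at hlen
        omega
      have hrest : n ≤ rest.length := by simp only [List.length_cons] at hlen; omega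
      have htake : (rest ++ pvChildren t curr).take n = rest.take n := by
        rw [List.take_append_of_le_length hrest]
      have hno' : ∀ x ∈ (rest ++ pvChildren t curr).take n, ¬ (x - 1 = t ∨ 2 * x = t) := by
        rw [htake]
        intro x hx
        exact hno x (by simp only [List.take_succ_cons, List.mem_cons]; exact Or.inr hx)
      rw [ih _ hlen' hno']
      rw [htake, List.drop_append_of_le_length hrest]
      simp only [List.take_succ_cons, List.drop_succ_cons, List.flatMap_cons]
      rw [List.append_assoc]

-- the inner for-loop: a hit among the first n queue entries → `return ops`
theorem pvInner_hit (t : Int) : ∀ (n : Nat) (q : List Int), n ≤ q.length →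
    (∃ x ∈ q.take n, x - 1 = t ∨ 2 * x = t) →
    pvInner t n q = none := by
  intro n
  induction n with
  | zero => intro q _ h; simp at h
  | succ n ih =>
    intro q hlen h
    match q with
    | [] => simp at hlen
    | curr :: rest =>
      by_cases hcurr : curr - 1 = t ∨ 2 * curr = t
      · simp only [pvInner, if_pos hcurr]
      · simp only [pvInner, if_neg hcurr]
        apply ih
        · simp only [List.length_append, List.length_cons] at hlen ⊢
          omega
        · simp only [List.take_succ_cons, List.mem_cons] at h
          obtain ⟨x, hx, hhit⟩ := h
          rcases hx with rfl | hx
          · exact absurd hhit hcurr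
          · have hrest : n ≤ rest.length := by simp only [List.length_cons] at hlen; omega
            rw [List.take_append_of_le_length hrest]
            exact ⟨x, hx, hhit⟩

def HitL (t : Int) (L : List Int) : Prop := ∃ x ∈ L, x - 1 = t ∨ 2 * x = t

-- the while-loop returns ops + j where j is the first level with a hit
theorem pvWhile_eq (t : Int) : ∀ (j fuel : Nat) (L : List Int) (ops : Int), L ≠ [] →
    j < fuel → HitL t (pvLevels t j L) → (∀ i, i < j → ¬ HitL t (pvLevels t i L)) →
    pvWhile t fuel L ops = ops + j := by
  intro j
  induction j with
  | zero =>
    intro fuel L ops hL hf hhit _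
    obtain ⟨g, rfl⟩ : ∃ g, fuel = g + 1 := ⟨fuel - 1, by omega⟩
    simp only [pvWhile, if_neg hL]
    rw [pvInner_hit t L.length L le_rfl (by simpa [pvLevels, HitL, List.take_length] using hhit)]
    simp
  | succ j ih =>
    intro fuel L ops hL hf hhit hno
    obtain ⟨g, rfl⟩ : ∃ g, fuel = g + 1 := ⟨fuel - 1, by omega⟩
    simp only [pvWhile, if_neg hL]
    have hno0 : ∀ x ∈ L.take L.length, ¬ (x - 1 = t ∨ 2 * x = t) := by
      intro x hx hhx
      exact hno 0 (by omega) ⟨x, by simpa [pvLevels, List.take_length] using hx, hhx⟩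
    rw [pvInner_no_hit t L.length L le_rfl hno0]
    simp only [List.drop_length, List.take_length, List.nil_append]
    rw [ih g (L.flatMap (pvChildren t)) (ops + 1) (flatMap_children_ne_nil t L hL) (by omega)
      (by simpa [pvLevels] using hhit) (fun i hi => by simpa [pvLevels] using hno (i + 1) (by omega))]
    push_cast
    ring

theorem hitL_iff_hitN (s t : Int) (j : Nat) : HitL t (pvLevels t j [s]) ↔ HitN s t j := by
  unfold HitL HitN
  constructor
  · rintro ⟨x, hx, hhit⟩
    rw [mem_pvLevels] at hx
    obtain ⟨y, hy, hp⟩ := hx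
    simp only [List.mem_singleton] at hy
    subst hy
    exact ⟨x, hp, hhit⟩
  · rintro ⟨x, hp, hhit⟩
    exact ⟨x, (mem_pvLevels t j [s] x).mpr ⟨s, by simp, hp⟩, hhit⟩

-- a hit at level j yields an unpruned path of length j + 1
theorem hitN_to_reach (s t : Int) (j : Nat) (h : HitN s t j) : Reach t (j + 1) s := by
  obtain ⟨x, hp, hhit⟩ := h
  exact Reach_extend t x j s (PRm_to_Reach t j s x hp) (by omega)

-- ===== VERDICT (by name: the statement is the Claim_ definition above) =====
theorem BruteForcebrokenCalc_spec : Claim_equal_BruteForcebrokenCalc := by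
  intro s t _ hpre
  obtain ⟨hs, ht⟩ := hpre
  unfold Spec_BruteForcebrokenCalc
  rw [alt_eq_GV s t hs ht]
  unfold BruteForcebrokenCalc
  by_cases hne : s = t
  · rw [if_pos hne, GV_le s t (by omega)]
    omega
  · rw [if_neg hne]
    -- the greedy value, as a number of levels
    set g := GV s t with hg
    have hg1 : 1 ≤ g := GV_pos s t hs ht hne
    have hach : Reach t g.toNat s := GV_ach s t.toNat t le_rfl hs ht
    obtain ⟨j, hj, hhit⟩ := prune' t ht g.toNat s hne hach
    have hge : ∀ i : Nat, HitN s t i → g ≤ i + 1 := fun i hi =>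
      GV_lb' s hs (i + 1) t ht (hitN_to_reach s t i hi)
    have hj1 : (j : Int) + 1 = g := by
      have := hge j hhit
      omega
    have hjeq : j = g.toNat - 1 := by omega
    have hno : ∀ i, i < j → ¬ HitN s t i := by
      intro i hi hcon
      have := hge i hcon
      omega
    have hbnd := GV_bound s t.toNat t le_rfl hs ht
    rw [pvWhile_eq t j (s.natAbs + 2 * t.natAbs + 4) [s] 1 (by simp)
      (by omega) ((hitL_iff_hitN s t j).mpr hhit)
      (fun i hi => fun hc => hno i hi ((hitL_iff_hitN s t i).mp hc))]
    omega
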